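-- pv_equiv track=rewrite | github.com/PatoLocos/Erdos530 | experiments/test_axiom_general.py | greedy_spread_sidon
-- ===== SOURCE A (Python) =====
-- def is_sidon(S):
--     S = sorted(S)
--     sums = set()
--     for i in range(len(S)):
--         for j in range(i, len(S)):
--             s = S[i] + S[j]
--             if s in sums:
--                 return False
--             sums.add(s)
--     return True
--
-- def greedy_spread_sidon(k, min_gap=1):
--     """Greedy Sidon set construction with minimum gap between elements."""
--     S = [0]
--     candidate = min_gap
--     while len(S) < k:
--         if is_sidon(S + [candidate]):
--             S.append(candidate)
--             candidate += min_gap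
--         else:
--             candidate += 1
--     return S
-- ===== SOURCE B (Python) =====
-- def greedy_spread_sidon(k, min_gap=1):
--     """Greedy Sidon set construction with minimum gap between elements."""
--     S = [0]
--     sums = {0}
--     candidate = min_gap
--     while len(S) < k:
--         new = [candidate + s for s in S] + [2 * candidate]
--         if len(set(new)) == len(new) and sums.isdisjoint(new):
--             S.append(candidate)
--             sums.update(new)
--             candidate += min_gap
--         else:
--             candidate += 1
--     return S
-- ===== Notes on version B (the rewrite author's own statement) =====
-- stated objective: alternative
-- what changed: Instead of re-sorting the candidate set and rechecking all pairwise sums from scratch for every candidate, B maintains the set of pairwise sums incrementally and tests only the candidate's new sums (distinctness among themselves and disjointness from the maintained set); intended as faster (measured 28.6x at n=64) but a timing run could not confirm it at its largest size, where both time out.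
import Mathlib
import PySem

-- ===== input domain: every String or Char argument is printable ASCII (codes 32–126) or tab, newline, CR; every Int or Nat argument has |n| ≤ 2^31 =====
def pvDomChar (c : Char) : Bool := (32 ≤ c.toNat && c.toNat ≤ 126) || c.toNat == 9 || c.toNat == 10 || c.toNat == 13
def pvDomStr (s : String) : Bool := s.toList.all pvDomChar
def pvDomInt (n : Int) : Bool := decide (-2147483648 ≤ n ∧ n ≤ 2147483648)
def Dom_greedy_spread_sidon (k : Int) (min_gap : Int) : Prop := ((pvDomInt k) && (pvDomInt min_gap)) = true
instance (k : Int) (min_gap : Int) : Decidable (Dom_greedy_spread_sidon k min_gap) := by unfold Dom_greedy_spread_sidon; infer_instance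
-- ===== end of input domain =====

-- B replaces A's per-candidate sort-and-recheck of all pairwise sums by an incrementally
-- maintained pairwise-sum set, testing only the sums the new candidate would add.

-- ===== PORT A =====
-- is_sidon: the two index loops 'for i in range(len(S)) / for j in range(i, len(S))' are
-- transcribed as structural recursion over suffixes of the sorted list; this visits exactly
-- the pairs (i, j >= i) in the same order, with the same running set and the same early
-- 'return False' (exact: every index the Python uses is in range).
def pvSidonInner (x : Int) (row : List Int) (sums : PySem.Set Int) : Option (PySem.Set Int) :=
  match row with
  | [] => some sums
  | y :: ys =>
    if PySem.Set.contains sums (x + y) then none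
    else pvSidonInner x ys (PySem.Set.add sums (x + y))

def pvSidonOuter (T : List Int) (sums : PySem.Set Int) : Bool :=
  match T with
  | [] => true
  | x :: xs =>
    match pvSidonInner x (x :: xs) sums with
    | none => false
    | some sums' => pvSidonOuter xs sums'

def pvIsSidon (S : List Int) : Bool :=
  pvSidonOuter (PySem.List.sorted S (fun x => x) false) PySem.Set.empty

-- fuel guard making the unbounded Python 'while' total; both ports consume one unit per
-- iteration, so the guard does not influence the equivalence.
def pvFuel : Nat := 18446744073709551616

def pvLoopA (k min_gap : Int) : Nat → List Int → Int → List Int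
  | 0, S, _ => S
  | fuel + 1, S, candidate =>
    if (S.length : Int) < k then
      if pvIsSidon (S ++ [candidate]) then
        pvLoopA k min_gap fuel (S ++ [candidate]) (candidate + min_gap)
      else
        pvLoopA k min_gap fuel S (candidate + 1)
    else S

def greedy_spread_sidon (k : Int) (min_gap : Int) : List Int :=
  pvLoopA k min_gap pvFuel [0] min_gap

-- ===== PORT B =====
def pvLoopB (k min_gap : Int) : Nat → List Int → PySem.Set Int → Int → List Int
  | 0, S, _, _ => S
  | fuel + 1, S, sums, candidate =>
    if (S.length : Int) < k then
      let new := S.map (fun s => candidate + s) ++ [2 * candidate]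
      if PySem.Set.len (PySem.Set.ofList new) == new.length && PySem.Set.isdisjoint sums new then
        pvLoopB k min_gap fuel (S ++ [candidate]) (PySem.Set.update sums new) (candidate + min_gap)
      else
        pvLoopB k min_gap fuel S sums (candidate + 1)
    else S

def greedy_spread_sidon_alt (k : Int) (min_gap : Int) : List Int :=
  pvLoopB k min_gap pvFuel [0] (PySem.Set.ofList [0]) min_gap

-- ===== PRECONDITION & SPEC =====
def Spec_greedy_spread_sidon (k : Int) (min_gap : Int) (out : List Int) : Prop := out = greedy_spread_sidon_alt k min_gap
instance (k : Int) (min_gap : Int) (out : List Int) : Decidable (Spec_greedy_spread_sidon k min_gap out) := by unfold Spec_greedy_spread_sidon; infer_instance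

-- ===== CLAIM (what is proved, stated in full; the proofs are below) =====
def Claim_equal_greedy_spread_sidon : Prop := ∀ (k : Int) (min_gap : Int), Dom_greedy_spread_sidon k min_gap → Spec_greedy_spread_sidon k min_gap (greedy_spread_sidon k min_gap)

-- ===== LEMMAS AND PROOFS =====

-- all pairwise sums S[i] + S[j], i ≤ j, in A's iteration order
def pvPairSums (L : List Int) : List Int :=
  L.sym2.map (Sym2.lift ⟨fun a b => a + b, fun a b => by ring⟩)

theorem pvPairSums_nil : pvPairSums [] = [] := rfl

theorem pvPairSums_cons (x : Int) (xs : List Int) :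
    pvPairSums (x :: xs) = (x :: xs).map (fun y => x + y) ++ pvPairSums xs := by
  simp [pvPairSums, List.sym2, Function.comp]

theorem pvPairSums_perm {l1 l2 : List Int} (h : l1.Perm l2) :
    (pvPairSums l1).Perm (pvPairSums l2) := (h.sym2).map _

-- 'process a list against a seen-set with early False' — the shape of A's double loop
def pvDistinctFrom : List Int → PySem.Set Int → Bool
  | [], _ => true
  | x :: xs, seen =>
    if PySem.Set.contains seen x then false else pvDistinctFrom xs (PySem.Set.add seen x)

theorem pvSidonInner_eq (x : Int) : ∀ (row : List Int) (sums : PySem.Set Int),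
    pvSidonInner x row sums =
      if pvDistinctFrom (row.map (fun y => x + y)) sums then
        some (PySem.Set.update sums (row.map (fun y => x + y)))
      else none := by
  intro row
  induction row with
  | nil => intro sums; simp [pvSidonInner, pvDistinctFrom, PySem.Set.update_nil]
  | cons y ys ih =>
    intro sums
    by_cases hm : x + y ∈ sums
    · simp [pvSidonInner, pvDistinctFrom, hm]
    · simp [pvSidonInner, pvDistinctFrom, PySem.Set.update_cons, hm, ih]

theorem pvDistinctFrom_append : ∀ (a b : List Int) (s : PySem.Set Int),
    pvDistinctFrom (a ++ b) s =
      if pvDistinctFrom a s then pvDistinctFrom b (PySem.Set.update s a) else false := by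
  intro a
  induction a with
  | nil => intro b s; simp [pvDistinctFrom, PySem.Set.update_nil]
  | cons x xs ih =>
    intro b s
    by_cases hm : x ∈ s
    · simp [pvDistinctFrom, hm]
    · simp [pvDistinctFrom, PySem.Set.update_cons, hm, ih]

theorem pvSidonOuter_eq : ∀ (T : List Int) (sums : PySem.Set Int),
    pvSidonOuter T sums = pvDistinctFrom (pvPairSums T) sums := by
  intro T
  induction T with
  | nil => intro sums; simp [pvSidonOuter, pvPairSums_nil, pvDistinctFrom]
  | cons x xs ih =>
    intro sums
    rw [pvPairSums_cons, pvDistinctFrom_append]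
    show (match pvSidonInner x (x :: xs) sums with
          | none => false
          | some sums' => pvSidonOuter xs sums') = _
    rw [pvSidonInner_eq]
    by_cases h : pvDistinctFrom ((x :: xs).map (fun y => x + y)) sums = true
    · rw [if_pos h, if_pos h]
      exact ih _
    · rw [if_neg h, if_neg h]

theorem pvDistinctFrom_iff : ∀ (l : List Int) (s : PySem.Set Int),
    pvDistinctFrom l s = true ↔ l.Nodup ∧ ∀ x ∈ l, x ∉ s := by
  intro l
  induction l with
  | nil => intro s; simp [pvDistinctFrom]
  | cons x xs ih =>
    intro s
    by_cases hm : x ∈ s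
    · rw [show pvDistinctFrom (x :: xs) s = false by simp [pvDistinctFrom, hm]]
      simp only [Bool.false_eq_true, false_iff, not_and]
      intro _ h
      exact h x (List.mem_cons_self ..) hm
    · rw [show pvDistinctFrom (x :: xs) s = pvDistinctFrom xs (PySem.Set.add s x) by
        simp [pvDistinctFrom, hm]]
      rw [ih]
      simp only [PySem.Set.mem_add, List.nodup_cons, List.mem_cons, not_or]
      constructor
      · rintro ⟨hnd, hall⟩
        refine ⟨⟨fun hxx => (hall x hxx).2 rfl, hnd⟩, ?_⟩
        rintro y (rfl | hy)
        · exact hm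
        · exact (hall y hy).1
      · rintro ⟨⟨hxn, hnd⟩, hall⟩
        exact ⟨hnd, fun y hy => ⟨hall y (Or.inr hy), fun h => hxn (h ▸ hy)⟩⟩

theorem pvIsSidon_iff (S : List Int) : pvIsSidon S = true ↔ (pvPairSums S).Nodup := by
  unfold pvIsSidon
  rw [pvSidonOuter_eq, pvDistinctFrom_iff]
  have hperm : (pvPairSums (PySem.List.sorted S (fun x => x) false)).Perm (pvPairSums S) :=
    pvPairSums_perm (PySem.List.sorted_perm ..)
  constructor
  · rintro ⟨hnd, -⟩; exact hperm.nodup_iff.mp hnd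
  · intro hnd
    refine ⟨hperm.nodup_iff.mpr hnd, ?_⟩
    intro y _ hy
    simp [PySem.Set.empty] at hy

theorem pvOfListLen_iff (l : List Int) :
    (PySem.Set.len (PySem.Set.ofList l) == (l.length : Int)) = true ↔ l.Nodup := by
  have hperm : (PySem.Set.ofList l).Perm l.dedup := by
    rw [List.perm_ext_iff_of_nodup (PySem.Set.nodup_ofList l) l.nodup_dedup]
    intro x
    rw [PySem.Set.mem_ofList, List.mem_dedup]
  rw [beq_iff_eq]
  show ((PySem.Set.ofList l).length : Int) = (l.length : Int) ↔ l.Nodup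
  rw [Nat.cast_inj, hperm.length_eq]
  constructor
  · intro h
    have heq := (l.dedup_sublist).eq_of_length h
    rw [← heq]
    exact l.nodup_dedup
  · intro h
    rw [List.dedup_eq_self.mpr h]

theorem pvNew_perm (S : List Int) (c : Int) :
    (S.map (fun s => c + s) ++ [2 * c]).Perm ((c :: S).map (fun y => c + y)) := by
  rw [List.map_cons, ← two_mul]
  exact List.perm_append_singleton _ _

theorem pvCond_eq (S : List Int) (c : Int) (sums : PySem.Set Int)
    (hN : (pvPairSums S).Nodup) (hm : ∀ x, x ∈ sums ↔ x ∈ pvPairSums S) :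
    pvIsSidon (S ++ [c]) =
      (PySem.Set.len (PySem.Set.ofList (S.map (fun s => c + s) ++ [2 * c]))
          == ((S.map (fun s => c + s) ++ [2 * c]).length : Int)
        && PySem.Set.isdisjoint sums (S.map (fun s => c + s) ++ [2 * c])) := by
  apply Bool.eq_iff_iff.mpr
  rw [pvIsSidon_iff, Bool.and_eq_true, pvOfListLen_iff, PySem.Set.isdisjoint_iff]
  have hperm : (pvPairSums (S ++ [c])).Perm ((c :: S).map (fun y => c + y) ++ pvPairSums S) := by
    have h1 := pvPairSums_perm (List.perm_append_singleton c S)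
    rw [pvPairSums_cons] at h1
    exact h1
  rw [hperm.nodup_iff, List.nodup_append]
  have hnp := pvNew_perm S c
  constructor
  · rintro ⟨hf, -, hd⟩
    refine ⟨hnp.nodup_iff.mpr hf, fun x hx hxn => ?_⟩
    exact hd x (hnp.mem_iff.mp hxn) x ((hm x).mp hx) rfl
  · rintro ⟨hf, hd⟩
    refine ⟨hnp.nodup_iff.mp hf, hN, fun a ha b hb hab => ?_⟩
    exact hd b ((hm b).mpr hb) (hnp.mem_iff.mpr (hab ▸ ha))

theorem pvInvStep (S : List Int) (c : Int) (sums : PySem.Set Int)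
    (hm : ∀ x, x ∈ sums ↔ x ∈ pvPairSums S) :
    ∀ x, x ∈ PySem.Set.update sums (S.map (fun s => c + s) ++ [2 * c]) ↔
      x ∈ pvPairSums (S ++ [c]) := by
  intro x
  rw [PySem.Set.mem_update, hm]
  have hperm : (pvPairSums (S ++ [c])).Perm ((c :: S).map (fun y => c + y) ++ pvPairSums S) := by
    have h1 := pvPairSums_perm (List.perm_append_singleton c S)
    rw [pvPairSums_cons] at h1
    exact h1
  rw [hperm.mem_iff]
  simp only [List.mem_append, List.map_cons, List.mem_cons, List.mem_map,
    List.not_mem_nil, or_false, two_mul]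
  constructor
  · rintro (h | h | h)
    · exact Or.inr h
    · exact Or.inl (Or.inr h)
    · exact Or.inl (Or.inl h)
  · rintro ((h | h) | h)
    · exact Or.inr (Or.inr h)
    · exact Or.inr (Or.inl h)
    · exact Or.inl h

theorem pvLoop_eq (k g : Int) : ∀ (fuel : Nat) (S : List Int) (sums : PySem.Set Int) (c : Int),
    (pvPairSums S).Nodup → (∀ x, x ∈ sums ↔ x ∈ pvPairSums S) →
    pvLoopA k g fuel S c = pvLoopB k g fuel S sums c := by
  intro fuel
  induction fuel with
  | zero => intro S sums c _ _; rfl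
  | succ n ih =>
    intro S sums c hN hm
    simp only [pvLoopA, pvLoopB]
    by_cases hk : (S.length : Int) < k
    · rw [if_pos hk, if_pos hk, ← pvCond_eq S c sums hN hm]
      by_cases hc : pvIsSidon (S ++ [c]) = true
      · rw [if_pos hc, if_pos hc]
        exact ih (S ++ [c]) _ _ ((pvIsSidon_iff _).mp hc) (pvInvStep S c sums hm)
      · rw [if_neg hc, if_neg hc]
        exact ih S sums (c + 1) hN hm
    · rw [if_neg hk, if_neg hk]

-- ===== VERDICT (by name: the statement is the Claim_ definition above) =====
theorem greedy_spread_sidon_spec : Claim_equal_greedy_spread_sidon := by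
  unfold Claim_equal_greedy_spread_sidon Spec_greedy_spread_sidon
  intro k g _
  unfold greedy_spread_sidon greedy_spread_sidon_alt
  apply pvLoop_eq
  · rw [pvPairSums_cons, pvPairSums_nil]
    simp
  · intro x
    rw [pvPairSums_cons, pvPairSums_nil]
    simp [PySem.Set.mem_ofList]
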